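-- pv_equiv track=rewrite | github.com/cxygiao/Transmission-Cost-Optimization-Dynamic-Look-Ahead | Utils/circuit_cut.py | line_sequence_change_combination_4
-- ===== SOURCE A (Python) =====
-- import itertools
--
-- def single_to_leave_line_sequence(line_sequence_combination,qbit):
--     str2 = ['A', 'B', 'C', 'D', 'E', 'F', 'G', 'H', 'I', 'J', 'K', 'L', 'M', 'N', 'O', 'P', 'Q', 'R', 'S', 'T', 'U',
--             'V', 'W', 'X', 'Y', 'Z']
--     all_line_sequence = list(line_sequence_combination)
--     leave_line_sequence = []
--     for i in range(int(qbit)):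
--         if str2[i] not in all_line_sequence:
--             leave_line_sequence.append(str2[i])
--     new_leave_line_sequence = "".join(leave_line_sequence)
--     return new_leave_line_sequence
--
-- def line_sequence_change_combination_4(qbit,cut_list):
--     str1 = ''
--     # 最多支持 26量子位
--     str2 = ['A', 'B', 'C', 'D', 'E', 'F', 'G', 'H', 'I', 'J', 'K', 'L', 'M', 'N', 'O', 'P', 'Q', 'R', 'S', 'T', 'U',
--             'V', 'W', 'X', 'Y', 'Z']
--     for i in range(int(qbit)):
--         # str1：ABCDEFGHIJKL.... 共qbit个
--         str1 = str1 + str2[i]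
--     # 排列组合
--     line_sequence_combination = []  # 线序排列集合['ABCDEF', 'ABCDEG', 'ABCDEH', 'ABCDEI', 'ABCDEJ', 'ABCDEK', 'ABCDEL', 'ABCDFG', 'ABCDFH', 'ABCDFI', 'ABCDFJ'......]
--     for i in itertools.combinations(str1, cut_list[0]):
--         line_sequence_1 = ''.join(i)
--         line_sequence_234 = single_to_leave_line_sequence(line_sequence_1,qbit)
--         # 对23部分线序重新组合
--         for j in itertools.combinations(line_sequence_234, cut_list[1]):
--             line_sequence_2 = ''.join(j)
--             line_sequence_12 = line_sequence_1+line_sequence_2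
--             line_sequence_34 = single_to_leave_line_sequence(line_sequence_12, qbit)
--             for k in itertools.combinations(line_sequence_34, cut_list[2]):
--                 line_sequence_3 = ''.join(k)
--                 line_sequence_123 = line_sequence_12 + line_sequence_3
--                 line_sequence_4 = single_to_leave_line_sequence(line_sequence_123, qbit)
--                 line_sequence = line_sequence_123+line_sequence_4
--                 line_sequence_combination.append(line_sequence)
--     return line_sequence_combination
-- ===== SOURCE B (Python) =====
-- import itertools
--
-- def _partitions(pool, sizes, prefix):
--     # recursive: choose sizes[0] letters from pool (alphabetical order kept), recurse on the rest
--     if not sizes: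
--         yield prefix + pool
--         return
--     for combo in itertools.combinations(pool, sizes[0]):
--         chosen = ''.join(combo)
--         rest = ''.join(c for c in pool if c not in chosen)
--         yield from _partitions(rest, sizes[1:], prefix + chosen)
--
-- def line_sequence_change_combination_4(qbit, cut_list):
--     str2 = ['A', 'B', 'C', 'D', 'E', 'F', 'G', 'H', 'I', 'J', 'K', 'L', 'M', 'N', 'O', 'P', 'Q', 'R', 'S', 'T', 'U',
--             'V', 'W', 'X', 'Y', 'Z']
--     str1 = ''.join(str2[i] for i in range(int(qbit)))
--     return list(_partitions(str1, [cut_list[0], cut_list[1], cut_list[2]], ''))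
-- ===== Notes on version B (the rewrite author's own statement) =====
-- stated objective: simpler
-- what changed: Replaced the three hardcoded nested combination loops, each recomputing the remainder by rescanning the 26-letter alphabet, with one recursive generator partition(pool, sizes, prefix) that filters the chosen letters out of the current pool and recurses over the block-size list, appending the remaining pool at the base case.
-- outside the precondition, e.g. on line_sequence_change_combination_4(3, [5, 1]): A returns [], B raises IndexError; on line_sequence_change_combination_4(-1, [1, -1]): A returns [], B raises IndexError
import Mathlib
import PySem

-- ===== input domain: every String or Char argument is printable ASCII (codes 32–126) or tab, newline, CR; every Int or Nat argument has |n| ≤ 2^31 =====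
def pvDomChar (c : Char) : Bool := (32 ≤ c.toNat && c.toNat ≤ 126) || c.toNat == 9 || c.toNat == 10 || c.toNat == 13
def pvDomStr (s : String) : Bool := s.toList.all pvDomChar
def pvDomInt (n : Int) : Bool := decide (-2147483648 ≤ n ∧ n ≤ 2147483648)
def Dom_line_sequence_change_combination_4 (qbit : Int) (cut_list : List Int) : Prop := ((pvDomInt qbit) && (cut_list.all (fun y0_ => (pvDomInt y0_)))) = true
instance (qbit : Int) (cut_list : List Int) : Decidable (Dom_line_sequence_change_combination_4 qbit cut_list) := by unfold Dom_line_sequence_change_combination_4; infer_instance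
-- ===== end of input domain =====

-- B replaces A's three hardcoded nested combination loops (with alphabet rescans for the
-- remainder) by one recursive partition helper over the block-size list (objective: simpler).


-- ===== PORT A =====
-- the 26-letter alphabet str2 used by both Python versions
def pvAlpha : List Char :=
  ['A','B','C','D','E','F','G','H','I','J','K','L','M','N','O','P','Q','R','S','T','U','V','W','X','Y','Z']

-- itertools.combinations over a list of chars (shared: both Pythons call itertools.combinations)
def pvCombos (n : Nat) (xs : List Char) : List (List Char) :=
  match n, xs with
  | 0, _ => [[]]
  | _ + 1, [] => []
  | m + 1, x :: ys => ((pvCombos m ys).map (fun c => x :: c)) ++ pvCombos (m + 1) ys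
termination_by xs.length
decreasing_by all_goals simp

-- A's str1-building loop: for i in range(int(qbit)): str1 = str1 + str2[i]
def pvStr1 (qbit : Int) : List Char :=
  (PySem.List.pyRange 0 qbit 1).foldl
    (fun acc i => acc ++ (match PySem.List.pyGet? pvAlpha i with | some c => [c] | none => []))
    []

-- A's helper single_to_leave_line_sequence (on the char-list side; ''.join at the end is the list itself)
def pvLeave (qbit : Int) (s : List Char) : List Char :=
  (PySem.List.pyRange 0 qbit 1).foldl
    (fun acc i =>
      match PySem.List.pyGet? pvAlpha i with
      | some c => if c ∈ s then acc else acc ++ [c]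
      | none => acc)
    []

def line_sequence_change_combination_4 (qbit : Int) (cut_list : List Int) : List String :=
  let str1 := pvStr1 qbit
  (pvCombos (PySem.List.pyGetD cut_list 0 0).toNat str1).foldl
    (fun acc l1 =>
      let l234 := pvLeave qbit l1
      (pvCombos (PySem.List.pyGetD cut_list 1 0).toNat l234).foldl
        (fun acc2 l2 =>
          let l12 := l1 ++ l2
          let l34 := pvLeave qbit l12
          (pvCombos (PySem.List.pyGetD cut_list 2 0).toNat l34).foldl
            (fun acc3 l3 =>
              let l123 := l12 ++ l3
              let l4 := pvLeave qbit l123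
              acc3 ++ [String.ofList (l123 ++ l4)])
            acc2)
        acc)
    []

-- ===== PORT B =====
-- B's recursive helper _partitions(pool, sizes, prefix)
def pvPartitions (pool : List Char) (sizes : List Nat) (pfx : List Char) : List (List Char) :=
  match sizes with
  | [] => [pfx ++ pool]
  | n :: rest =>
      (pvCombos n pool).flatMap
        (fun chosen => pvPartitions (pool.filter (fun c => !decide (c ∈ chosen))) rest (pfx ++ chosen))

def line_sequence_change_combination_4_alt (qbit : Int) (cut_list : List Int) : List String :=
  let str1 := pvStr1 qbit
  (pvPartitions str1
      [(PySem.List.pyGetD cut_list 0 0).toNat,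
       (PySem.List.pyGetD cut_list 1 0).toNat,
       (PySem.List.pyGetD cut_list 2 0).toNat] []).map String.ofList

-- ===== PRECONDITION & SPEC =====
-- Pre_ excludes the inputs on which A raises (qbit > 26: IndexError on str2[i]; a negative size
-- actually passed to itertools.combinations: ValueError), and cut_lists with fewer than three
-- entries, on which A happens to return [] only when an outer size already exceeds the pool so the
-- missing index is never read, while B reads all three sizes up front and raises IndexError.
def Pre_line_sequence_change_combination_4 (qbit : Int) (cut_list : List Int) : Prop :=
  qbit ≤ 26 ∧ 3 ≤ cut_list.length ∧ 0 ≤ cut_list.getD 0 0 ∧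
    (cut_list.getD 0 0 ≤ (qbit.toNat : Int) → 0 ≤ cut_list.getD 1 0) ∧
    (cut_list.getD 0 0 ≤ (qbit.toNat : Int) →
      cut_list.getD 1 0 ≤ (qbit.toNat : Int) - cut_list.getD 0 0 → 0 ≤ cut_list.getD 2 0)
instance (qbit : Int) (cut_list : List Int) : Decidable (Pre_line_sequence_change_combination_4 qbit cut_list) := by
  unfold Pre_line_sequence_change_combination_4; infer_instance
def pvWitness_line_sequence_change_combination_4 : Int × List Int := (4, [1, 1, 1])
def Spec_line_sequence_change_combination_4 (qbit : Int) (cut_list : List Int) (out : List String) : Prop := out = line_sequence_change_combination_4_alt qbit cut_list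
instance (qbit : Int) (cut_list : List Int) (out : List String) : Decidable (Spec_line_sequence_change_combination_4 qbit cut_list out) := by unfold Spec_line_sequence_change_combination_4; infer_instance

-- ===== CLAIM (what is proved, stated in full; the proofs are below) =====
def Claim_equal_line_sequence_change_combination_4 : Prop := ∀ (qbit : Int) (cut_list : List Int), Dom_line_sequence_change_combination_4 qbit cut_list → Pre_line_sequence_change_combination_4 qbit cut_list → Spec_line_sequence_change_combination_4 qbit cut_list (line_sequence_change_combination_4 qbit cut_list)

-- ===== LEMMAS AND PROOFS =====

-- both alphabet scans, generalized over the initial accumulator, for a Nat bound n ≤ 26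
theorem pvStr1_scan (n : Nat) (hn : n ≤ 26) (acc : List Char) :
    (PySem.List.pyRange 0 (n : Int) 1).foldl
      (fun acc i => acc ++ (match PySem.List.pyGet? pvAlpha i with | some c => [c] | none => []))
      acc = acc ++ pvAlpha.take n := by
  induction n generalizing acc with
  | zero => simp [PySem.List.pyRange_one_eq_nil]
  | succ m ih =>
      have h1 : ((m : Int) + 1) = ((m + 1 : Nat) : Int) := by push_cast; ring
      have h2 : PySem.List.pyRange 0 ((m + 1 : Nat) : Int) 1
          = PySem.List.pyRange 0 (m : Int) 1 ++ [(m : Int)] := by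
        rw [← h1, PySem.List.pyRange_one_succ_right (by positivity)]
      rw [h2, List.foldl_append, ih (by omega)]
      have hm : m < pvAlpha.length := by simp [pvAlpha]; omega
      simp only [List.foldl_cons, List.foldl_nil]
      rw [PySem.List.pyGet?_natCast pvAlpha m, List.getElem?_eq_getElem hm,
        List.take_add_one, List.getElem?_eq_getElem hm]
      simp

theorem pvLeave_scan (n : Nat) (hn : n ≤ 26) (s : List Char) (acc : List Char) :
    (PySem.List.pyRange 0 (n : Int) 1).foldl
      (fun acc i =>
        match PySem.List.pyGet? pvAlpha i with
        | some c => if c ∈ s then acc else acc ++ [c]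
        | none => acc)
      acc = acc ++ (pvAlpha.take n).filter (fun x => !decide (x ∈ s)) := by
  induction n generalizing acc with
  | zero => simp [PySem.List.pyRange_one_eq_nil]
  | succ m ih =>
      have h1 : ((m : Int) + 1) = ((m + 1 : Nat) : Int) := by push_cast; ring
      have h2 : PySem.List.pyRange 0 ((m + 1 : Nat) : Int) 1
          = PySem.List.pyRange 0 (m : Int) 1 ++ [(m : Int)] := by
        rw [← h1, PySem.List.pyRange_one_succ_right (by positivity)]
      rw [h2, List.foldl_append, ih (by omega)]
      have hm : m < pvAlpha.length := by simp [pvAlpha]; omega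
      simp only [List.foldl_cons, List.foldl_nil]
      have ht : List.take (m + 1) pvAlpha = List.take m pvAlpha ++ [pvAlpha[m]] := by
        rw [List.take_add_one, List.getElem?_eq_getElem hm]; rfl
      rw [PySem.List.pyGet?_natCast pvAlpha m, List.getElem?_eq_getElem hm, ht]
      dsimp only
      by_cases hmem : pvAlpha[m] ∈ s
      · rw [if_pos hmem]
        simp only [List.filter_append, List.filter_cons, hmem, decide_true, Bool.not_true]
        simp
      · rw [if_neg hmem]
        simp only [List.filter_append, List.filter_cons, hmem, decide_false, Bool.not_false]
        simp [List.append_assoc]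

theorem pvStr1_eq (qbit : Int) (h : qbit ≤ 26) :
    pvStr1 qbit = pvAlpha.take qbit.toNat := by
  unfold pvStr1
  by_cases hq : qbit ≤ 0
  · rw [PySem.List.pyRange_one_eq_nil hq]
    simp [Int.toNat_of_nonpos hq]
  · have : qbit = (qbit.toNat : Int) := by omega
    rw [this]
    exact pvStr1_scan qbit.toNat (by omega) []

theorem pvLeave_eq (qbit : Int) (h : qbit ≤ 26) (s : List Char) :
    pvLeave qbit s = (pvAlpha.take qbit.toNat).filter (fun x => !decide (x ∈ s)) := by
  unfold pvLeave
  by_cases hq : qbit ≤ 0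
  · rw [PySem.List.pyRange_one_eq_nil hq]
    simp [Int.toNat_of_nonpos hq]
  · have : qbit = (qbit.toNat : Int) := by omega
    rw [this]
    exact pvLeave_scan qbit.toNat (by omega) s []

-- successive not-in filters collapse to one filter over the concatenation
theorem filter_notMem_filter (l s t : List Char) :
    (l.filter (fun x => !decide (x ∈ s))).filter (fun x => !decide (x ∈ t))
      = l.filter (fun x => !decide (x ∈ s ++ t)) := by
  rw [List.filter_filter]
  apply List.filter_congr
  intro x _
  simp [List.mem_append, Bool.and_comm]

-- ===== VERDICT (by name: the statement is the Claim_ definition above) =====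
theorem line_sequence_change_combination_4_spec : Claim_equal_line_sequence_change_combination_4 := by
  intro qbit cut_list _ hpre
  obtain ⟨h26, -⟩ := hpre
  unfold Spec_line_sequence_change_combination_4
  unfold line_sequence_change_combination_4 line_sequence_change_combination_4_alt
  simp only [pvStr1_eq qbit h26, pvLeave_eq qbit h26]
  simp only [pvPartitions, filter_notMem_filter,
    PySem.List.foldl_append_singleton_eq_map, PySem.List.foldl_append_eq_flatMap,
    List.map_flatMap, List.map_map, ← List.map_eq_flatMap, List.nil_append,
    List.append_assoc, Function.comp_def]
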